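-- pv_equiv track=rewrite | github.com/Rayvivek881/python_django | DynamicPrograming/count_Integer_less_thenK.py | solve
-- ===== SOURCE A (Python) =====
-- MAX = 10
--
-- def numToVec(N):
--     digit = []
--     while N != 0:
--         digit.append(N % 10)
--         N = N // 10
--     if not digit:
--         digit.append(0)
--     digit = digit[::-1]
--     return digit
--
-- def solve(A, B, C):
--     d, d2 = 0, 0
--     digit = numToVec(C)
--     d = len(A)
--     if B > len(digit) or d == 0:
--         return 0
--     elif B < len(digit):
--         if A[0] == 0 and B != 1:
--             return (d - 1) * pow(d, B - 1)
--         else: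
--             return pow(d, B)
--     else:
--         dp = [0 for i in range(B + 1)]
--         lower = [0 for i in range(MAX + 1)]
--         for i in range(d):
--             lower[A[i] + 1] = 1
--         for i in range(1, MAX + 1):
--             lower[i] = lower[i - 1] + lower[i]
--         flag = True
--         dp[0] = 0
--         for i in range(1, B + 1):
--             d2 = lower[digit[i - 1]]
--             dp[i] = dp[i - 1] * d
--             if i == 1 and A[0] == 0 and B != 1:
--                 d2 = d2 - 1
--
--             if flag:
--                 dp[i] += d2
--             flag = (flag & (lower[digit[i - 1] + 1] == lower[digit[i - 1]] + 1))
--         return dp[B]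
-- ===== SOURCE B (Python) =====
-- def _digits(n):
--     if n < 10:
--         return [n]
--     return _digits(n // 10) + [n % 10]
--
-- def solve(A, B, C):
--     d = len(A)
--     ds = _digits(C)
--     L = len(ds)
--     if d == 0 or B > L:
--         return 0
--     if B < L:
--         raw = d ** B
--     else:
--         S = set(A)
--         def rank(rest):
--             if not rest:
--                 return 0
--             g = rest[0]
--             below = sum(1 for x in S if x < g) * d ** (len(rest) - 1)
--             return below + (rank(rest[1:]) if g in S else 0)
--         raw = rank(ds)
--     if A[0] == 0 and B != 1:
--         raw -= d ** (B - 1)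
--     return raw
-- ===== Notes on version B (the rewrite author's own statement) =====
-- stated objective: simpler
-- what changed: the equal-length branch drops the mark/prefix-sum table, the dp array and the in-loop i==1 special case: B computes the lexicographic rank of C's digit string among B-length strings over the deduped digit set by head-first recursion on the digit list, and the leading-zero correction becomes one uniform post-subtraction of d**(B-1) applied after every branch; digits come from head-first recursion instead of a reversed while-loop
-- outside the precondition, e.g. on solve([-3], 1, 5): A returns 0, B returns 1; on solve([2, 3], -1, 5): A returns 0.5, B returns 0.5
import Mathlib
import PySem

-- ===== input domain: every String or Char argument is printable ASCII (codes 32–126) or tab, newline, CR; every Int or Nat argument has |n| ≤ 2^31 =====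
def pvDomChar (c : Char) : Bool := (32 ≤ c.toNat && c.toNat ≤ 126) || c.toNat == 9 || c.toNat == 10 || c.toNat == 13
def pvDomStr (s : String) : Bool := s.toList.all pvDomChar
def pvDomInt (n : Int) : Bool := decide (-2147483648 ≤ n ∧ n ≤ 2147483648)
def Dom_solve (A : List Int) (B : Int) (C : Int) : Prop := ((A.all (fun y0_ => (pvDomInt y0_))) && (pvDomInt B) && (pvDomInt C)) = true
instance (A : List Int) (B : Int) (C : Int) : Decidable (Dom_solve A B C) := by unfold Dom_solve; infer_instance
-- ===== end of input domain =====

-- B replaces A's mark/prefix-sum table, dp array and in-loop i==1 special case by a head-first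
-- recursion computing the rank of C's digit string over the deduped digit set, with one uniform
-- post-subtraction of d^(B-1) for the leading-zero case (objective: simpler).

-- ===== PORT A =====
-- while-loop of numToVec, fuel-guarded (the fuel only makes the loop total; inside Pre_ (0 ≤ C) it never runs out)
def numToVecLoop : Nat → Int → List Int → List Int
  | 0, _, acc => acc
  | fuel + 1, N, acc =>
    if N ≠ 0 then numToVecLoop fuel (PySem.Int.floordiv N 10) (acc ++ [PySem.Int.mod N 10])
    else acc

def numToVec (N : Int) : List Int :=
  let digit := numToVecLoop (N.natAbs + 1) N []
  let digit := if digit = [] then digit ++ [0] else digit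
  (PySem.List.slice? digit none none (-1)).getD []

def solve (A : List Int) (B : Int) (C : Int) : Int :=
  let digit := numToVec C
  let d : Int := A.length
  if B > (digit.length : Int) ∨ d = 0 then 0
  else if B < (digit.length : Int) then
    if PySem.List.pyGetD A 0 0 = 0 ∧ B ≠ 1 then (d - 1) * d ^ (B - 1).toNat
    else d ^ B.toNat
  else
    let lower0 : List Int := List.replicate 11 0
    let lower1 := (PySem.List.pyRange 0 d 1).foldl
      (fun L i => PySem.List.pySetD L (PySem.List.pyGetD A i 0 + 1) 1) lower0
    let lower := (PySem.List.pyRange 1 11 1).foldl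
      (fun L i => PySem.List.pySetD L i (PySem.List.pyGetD L (i - 1) 0 + PySem.List.pyGetD L i 0)) lower1
    let dp0 : List Int := List.replicate (B + 1).toNat 0
    let s := (PySem.List.pyRange 1 (B + 1) 1).foldl
      (fun (s : List Int × Bool) i =>
        let g := PySem.List.pyGetD digit (i - 1) 0
        let d2 := PySem.List.pyGetD lower g 0
        let dpi := PySem.List.pyGetD s.1 (i - 1) 0 * d
        let d2' := if i = 1 ∧ PySem.List.pyGetD A 0 0 = 0 ∧ B ≠ 1 then d2 - 1 else d2
        let dpi' := if s.2 then dpi + d2' else dpi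
        (PySem.List.pySetD s.1 i dpi',
         s.2 && (PySem.List.pyGetD lower (g + 1) 0 == PySem.List.pyGetD lower g 0 + 1)))
      (dp0, true)
    PySem.List.pyGetD s.1 B 0

-- ===== PORT B =====
def digitsAlt (n : Int) : List Int :=
  if h : n < 10 then [n]
  else digitsAlt (PySem.Int.floordiv n 10) ++ [PySem.Int.mod n 10]
termination_by n.toNat
decreasing_by
  rw [PySem.Int.floordiv_eq_ediv_of_pos (by norm_num)]
  have h2 : 0 ≤ n / 10 := Int.ediv_nonneg (by omega) (by norm_num)
  have h3 : 10 * (n / 10) ≤ n := by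
    have := Int.emod_nonneg n (by norm_num : (10:Int) ≠ 0)
    have := Int.mul_ediv_add_emod n 10
    omega
  omega

def rankAlt (S : PySem.Set Int) (d : Int) : List Int → Int
  | [] => 0
  | g :: rest =>
    let below := ((S.countP (fun x => decide (x < g)) : Nat) : Int) * d ^ rest.length
    below + (if PySem.Set.contains S g then rankAlt S d rest else 0)

def solve_alt (A : List Int) (B : Int) (C : Int) : Int :=
  let d : Int := A.length
  let ds := digitsAlt C
  let L : Int := ds.length
  if d = 0 ∨ B > L then 0
  else
    let raw := if B < L then d ^ B.toNat else rankAlt (PySem.Set.ofList A) d ds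
    if PySem.List.pyGetD A 0 0 = 0 ∧ B ≠ 1 then raw - d ^ (B - 1).toNat else raw

-- ===== PRECONDITION & SPEC =====
-- Pre_ restricts to the natural domain: C ≥ 0 (A loops forever on C < 0), B ≥ 0 with A[0] ≠ 0 when
-- B = 0 (on the excluded B inputs pow returns a float, not an int), and — only when B equals the digit count of C (stated in
-- closed form via powers of 10), the sole branch that indexes the table by A's entries — A must hold
-- decimal digits 0–9: outside that range A raises IndexError or returns accidental
-- negative-index-wraparound values.
def Pre_solve (A : List Int) (B : Int) (C : Int) : Prop :=
  0 ≤ C ∧ 0 ≤ B ∧ (B = 0 → PySem.List.pyGetD A 0 0 ≠ 0) ∧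
    ((10:Int) ^ (B - 1).toNat ≤ max C 1 ∧ max C 1 < 10 ^ B.toNat → ∀ x ∈ A, 0 ≤ x ∧ x ≤ 9)
instance (A : List Int) (B : Int) (C : Int) : Decidable (Pre_solve A B C) := by
  unfold Pre_solve; infer_instance

def pvWitness_solve : List Int × Int × Int := ([1, 5], 2, 37)

def Spec_solve (A : List Int) (B : Int) (C : Int) (out : Int) : Prop := out = solve_alt A B C
instance (A : List Int) (B : Int) (C : Int) (out : Int) : Decidable (Spec_solve A B C out) := by
  unfold Spec_solve; infer_instance

-- ===== CLAIM (what is proved, stated in full; the proofs are below) =====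
def Claim_equal_solve : Prop := ∀ (A : List Int) (B : Int) (C : Int), Dom_solve A B C → Pre_solve A B C → Spec_solve A B C (solve A B C)

-- ===== LEMMAS AND PROOFS =====

theorem numToVecLoop_zero (f : Nat) (acc : List Int) : numToVecLoop f 0 acc = acc := by
  cases f <;> simp [numToVecLoop]

theorem digitsAlt_mem_range (n : Int) (hn : 0 ≤ n) : ∀ g ∈ digitsAlt n, 0 ≤ g ∧ g ≤ 9 := by
  induction n using digitsAlt.induct with
  | case1 n h =>
    intro g hg
    rw [digitsAlt, dif_pos h] at hg
    simp at hg; omega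
  | case2 n h ih =>
    intro g hg
    rw [digitsAlt, dif_neg h] at hg
    rcases List.mem_append.1 hg with h1 | h1
    · exact ih (by rw [PySem.Int.floordiv_eq_ediv_of_pos (by norm_num)]; exact Int.ediv_nonneg hn (by norm_num)) g h1
    · simp at h1
      rw [h1]
      have := Int.emod_nonneg n (by norm_num : (10:Int) ≠ 0)
      have := Int.emod_lt_of_pos n (by norm_num : (0:Int) < 10)
      omega

theorem digitsAlt_ne_nil (n : Int) : digitsAlt n ≠ [] := by
  rw [digitsAlt]
  split <;> simp

theorem digitsAlt_bounds (C : Int) (hC : 0 ≤ C) :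
    (10:Int) ^ ((digitsAlt C).length - 1) ≤ max C 1 ∧ max C 1 < 10 ^ (digitsAlt C).length := by
  induction C using digitsAlt.induct with
  | case1 n h =>
    rw [digitsAlt, dif_pos h]
    simp only [List.length_singleton, Nat.sub_self, pow_zero, pow_one]
    exact ⟨le_max_right _ _, max_lt (by omega) (by norm_num)⟩
  | case2 n h ih =>
    have hfd : PySem.Int.floordiv n 10 = n / 10 := PySem.Int.floordiv_eq_ediv_of_pos (by norm_num)
    have hm1 : 1 ≤ n / 10 := by
      have := Int.mul_ediv_add_emod n 10
      have := Int.emod_lt_of_pos n (by norm_num : (0:Int) < 10)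
      have := Int.emod_nonneg n (by norm_num : (10:Int) ≠ 0)
      omega
    have hdb : 10 * (n / 10) ≤ n ∧ n < 10 * (n / 10) + 10 := by
      have := Int.mul_ediv_add_emod n 10
      have := Int.emod_lt_of_pos n (by norm_num : (0:Int) < 10)
      have := Int.emod_nonneg n (by norm_num : (10:Int) ≠ 0)
      omega
    obtain ⟨ih1, ih2⟩ := by
      have := ih (by rw [hfd]; omega)
      rwa [hfd] at this
    rw [digitsAlt, dif_neg h, hfd]
    set lm := (digitsAlt (n / 10)).length with hlm
    have hlm1 : 1 ≤ lm := by
      have := digitsAlt_ne_nil (n / 10)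
      rw [hlm]
      cases hh : digitsAlt (n / 10) with
      | nil => exact absurd hh this
      | cons a l => simp
    have hmax : max (n / 10) 1 = n / 10 := max_eq_left (by omega)
    rw [hmax] at ih1 ih2
    have hlen : (digitsAlt (n / 10) ++ [PySem.Int.mod n 10]).length = lm + 1 := by
      simp [hlm]
    rw [hlen]
    have hmaxn : max n 1 = n := max_eq_left (by omega)
    rw [hmaxn]
    have hp : (10:Int) ^ lm = 10 ^ (lm - 1) * 10 := by
      have h9 : lm = (lm - 1) + 1 := by omega
      conv_lhs => rw [h9]
      rw [pow_succ]
    constructor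
    · have h1 : (10:Int) ^ (lm + 1 - 1) = 10 ^ lm := by norm_num
      rw [h1, hp]
      nlinarith [ih1, hdb.1, hm1]
    · have h2 : (10:Int) ^ (lm + 1) = 10 ^ lm * 10 := pow_succ 10 lm
      rw [h2]
      nlinarith [ih2, hdb.2]

theorem loop_eq (f : Nat) : ∀ (n : Int) (acc : List Int), 0 < n → n.toNat < f →
    numToVecLoop f n acc = acc ++ (digitsAlt n).reverse := by
  induction f with
  | zero => intro n acc h1 h2; omega
  | succ f ih =>
    intro n acc h1 h2
    rw [numToVecLoop]
    simp only [if_pos (by omega : n ≠ 0)]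
    by_cases h10 : n < 10
    · rw [PySem.Int.floordiv_eq_ediv_of_pos (by norm_num)]
      have : n / 10 = 0 := by omega
      rw [this, numToVecLoop_zero]
      rw [digitsAlt, dif_pos h10]
      rw [PySem.Int.mod_eq_emod_of_pos (by norm_num)]
      have : n % 10 = n := by omega
      simp [this]
    · have hfd : PySem.Int.floordiv n 10 = n / 10 := PySem.Int.floordiv_eq_ediv_of_pos (by norm_num)
      have h2' : 0 ≤ n / 10 := Int.ediv_nonneg (by omega) (by norm_num)
      have h3 : 10 * (n / 10) ≤ n ∧ n < 10 * (n / 10) + 10 := by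
        have := Int.emod_nonneg n (by norm_num : (10:Int) ≠ 0)
        have h4 : n % 10 < 10 := Int.emod_lt_of_pos n (by norm_num)
        have := Int.mul_ediv_add_emod n 10
        omega
      rw [ih (PySem.Int.floordiv n 10) _ (by rw [hfd]; omega) (by rw [hfd]; omega)]
      conv_rhs => rw [digitsAlt, dif_neg h10]
      simp

theorem numToVec_eq (C : Int) (hC : 0 ≤ C) : numToVec C = digitsAlt C := by
  unfold numToVec
  by_cases h0 : C = 0
  · subst h0
    simp [numToVecLoop_zero, PySem.List.slice?_none_none_neg_one]
    rw [digitsAlt]; simp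
  · rw [loop_eq _ C [] (by omega) (by omega)]
    simp [digitsAlt_ne_nil, PySem.List.slice?_none_none_neg_one]

-- mark fold: length and pointwise value
theorem markFold (l : List Int) (hl : ∀ x ∈ l, 0 ≤ x ∧ x ≤ 9) :
    ∀ (L : List Int), L.length = 11 →
      ((l.foldl (fun L x => PySem.List.pySetD L (x + 1) 1) L).length = 11 ∧
       ∀ j : Nat, j ≤ 10 →
         (l.foldl (fun L x => PySem.List.pySetD L (x + 1) 1) L).getD j 0 =
           if ((j : Int) - 1) ∈ l then 1 else L.getD j 0) := by
  induction l with
  | nil => intro L hL; simp [hL]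
  | cons x t ih =>
    intro L hL
    have hx := hl x (by simp)
    have hset : PySem.List.pySetD L (x + 1) 1 = L.set (x + 1).toNat 1 :=
      PySem.List.pySetD_of_nonneg L 1 (by omega)
    have hlen' : (L.set (x + 1).toNat 1).length = 11 := by simp [hL]
    have ih' := ih (fun y hy => hl y (by simp [hy])) (L.set (x + 1).toNat 1) hlen'
    constructor
    · simpa [hset] using ih'.1
    · intro j hj
      simp only [List.foldl_cons, hset]
      rw [ih'.2 j hj]
      by_cases hmem : ((j : Int) - 1) ∈ t
      · simp [hmem]
      · simp only [hmem, if_false]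
        by_cases hjx : (j : Int) - 1 = x
        · have hji : (x + 1).toNat = j := by omega
          rw [List.getD_eq_getElem?_getD, hji, List.getElem?_set_self (by omega)]
          simp [List.mem_cons, hjx]
        · have : ((j:Int) - 1) ∈ x :: t ↔ False := by simp [hjx, hmem]
          have hne : (x + 1).toNat ≠ j := by omega
          rw [List.getD_eq_getElem?_getD, List.getElem?_set_ne hne]
          simp [this, List.getD_eq_getElem?_getD]

theorem prefixFold (n : Nat) (hn : n ≤ 11) : ∀ (L : List Int), L.length = 11 →
    ((PySem.List.pyRange 1 (n : Int) 1).foldl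
        (fun L i => PySem.List.pySetD L i (PySem.List.pyGetD L (i - 1) 0 + PySem.List.pyGetD L i 0)) L).length = 11 ∧
    ∀ g : Nat, g ≤ 10 →
      ((PySem.List.pyRange 1 (n : Int) 1).foldl
        (fun L i => PySem.List.pySetD L i (PySem.List.pyGetD L (i - 1) 0 + PySem.List.pyGetD L i 0)) L).getD g 0 =
      if g < n then ((List.range (g + 1)).map (fun j => L.getD j 0)).sum else L.getD g 0 := by
  induction n with
  | zero =>
    intro L hL
    rw [PySem.List.pyRange_one_eq_nil (by norm_num)]
    simp [hL]
  | succ n ih =>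
    intro L hL
    rcases Nat.eq_zero_or_pos n with h0 | hpos
    · subst h0
      rw [(by norm_num : (((0:Nat) + 1 : Nat) : Int) = 1), PySem.List.pyRange_one_eq_nil (by norm_num)]
      refine ⟨hL, ?_⟩
      intro g hg
      simp only [List.foldl_nil]
      rcases Nat.eq_zero_or_pos g with hg0 | hgpos
      · subst hg0; simp
      · simp [Nat.not_lt.2 hgpos]
    · have hsplit : PySem.List.pyRange 1 ((n + 1 : Nat) : Int) 1 =
        PySem.List.pyRange 1 (n : Int) 1 ++ [(n : Int)] := by
        push_cast
        exact PySem.List.pyRange_one_succ_right (by exact_mod_cast hpos)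
      rw [hsplit, List.foldl_append]
      obtain ⟨ihlen, ihval⟩ := ih (by omega) L hL
      constructor
      · simp [List.foldl_cons, ihlen]
      · intro g hg
        simp only [List.foldl_cons, List.foldl_nil]
        have hcast : ((n : Int) - 1) = ((n - 1 : Nat) : Int) := by omega
        rw [hcast]
        rw [PySem.List.pySetD_natCast]
        rw [List.getD_eq_getElem?_getD]
        by_cases hgn : g = n
        · have hgn2 : n = g := hgn.symm
          subst hgn2
          rw [List.getElem?_set_self (by omega)]
          simp only [Option.getD_some]
          rw [PySem.List.pyGetD_natCast, PySem.List.pyGetD_natCast]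
          rw [ihval (n - 1) (by omega), ihval n (by omega)]
          simp only [if_pos (by omega : n - 1 < n), if_neg (lt_irrefl n)]
          rw [if_pos (by omega : n < n + 1)]
          have hr : List.range (n + 1) = List.range (n - 1 + 1) ++ [n] := by
            have h5 : n - 1 + 1 = n := by omega
            rw [h5, List.range_succ]
          rw [hr]
          simp
        · rw [List.getElem?_set_ne (by omega)]
          rw [← List.getD_eq_getElem?_getD]
          rw [ihval g hg]
          by_cases hlt : g < n
          · rw [if_pos hlt, if_pos (by omega : g < n + 1)]
          · rw [if_neg hlt, if_neg (by omega : ¬ g < n + 1)]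

theorem countP_lt_split (g : Int) (l : List Int) :
    l.countP (fun x => decide (x < g + 1)) =
      l.countP (fun x => decide (x < g)) + l.countP (fun x => decide (x = g)) := by
  induction l with
  | nil => simp
  | cons x t ih =>
    simp only [List.countP_cons, ih]
    rcases lt_trichotomy x g with h | h | h
    · rw [decide_eq_true (show x < g + 1 by omega), decide_eq_true h,
        decide_eq_false (show ¬ x = g by omega)]
      simp; omega
    · rw [decide_eq_true (show x < g + 1 by omega), decide_eq_false (show ¬ x < g by omega),
        decide_eq_true h]
      simp; omega
    · rw [decide_eq_false (show ¬ x < g + 1 by omega), decide_eq_false (show ¬ x < g by omega),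
        decide_eq_false (show ¬ x = g by omega)]
      simp

theorem countP_eq_ite (a : Int) (l : List Int) (h : l.Nodup) :
    l.countP (fun x => decide (x = a)) = if a ∈ l then 1 else 0 := by
  induction l with
  | nil => simp
  | cons x t ih =>
    simp only [List.nodup_cons] at h
    simp only [List.countP_cons, ih h.2, List.mem_cons]
    by_cases hxa : x = a
    · subst hxa
      rw [decide_eq_true rfl, if_neg (fun hm : x ∈ t => h.1 hm), if_pos (Or.inl rfl)]
      simp
    · rw [decide_eq_false hxa]
      by_cases hat : a ∈ t
      · rw [if_pos hat, if_pos (Or.inr hat)]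
        simp
      · rw [if_neg hat,
          if_neg (fun hor : a = x ∨ a ∈ t => hor.elim (fun h1 => hxa h1.symm) hat)]
        simp

theorem cnt_eq (A : List Int) (hA : ∀ x ∈ A, 0 ≤ x ∧ x ≤ 9) :
    ∀ g : Nat, g ≤ 10 →
      ((List.range (g + 1)).map (fun j : Nat => if ((j : Int) - 1) ∈ A then (1 : Int) else 0)).sum =
        (((PySem.Set.ofList A).countP (fun x => decide (x < (g : Int))) : Nat) : Int) := by
  intro g hg
  induction g with
  | zero =>
    simp only [Nat.zero_add, List.range_one, List.map_cons, List.map_nil, List.sum_cons,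
      List.sum_nil]
    have h1 : ((0 : Nat) : Int) - 1 ∉ A := fun h => by have := hA _ h; omega
    have h2 : (PySem.Set.ofList A).countP (fun x => decide (x < ((0 : Nat) : Int))) = 0 := by
      rw [List.countP_eq_zero]
      intro x hx
      have := hA x ((PySem.Set.mem_ofList A x).1 hx)
      simp only [decide_eq_true_eq]
      push_cast
      omega
    rw [if_neg h1, h2]
    norm_num
  | succ g ih =>
    rw [List.range_succ, List.map_append, List.sum_append, ih (by omega)]
    have hc : ((g + 1 : Nat) : Int) = (g : Int) + 1 := by push_cast; ring
    simp only [List.map_cons, List.map_nil, List.sum_cons, List.sum_nil, add_zero]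
    rw [hc, countP_lt_split, countP_eq_ite _ _ (PySem.Set.nodup_ofList A)]
    have hm : ((g : Nat) : Int) + 1 - 1 = ((g : Nat) : Int) := by ring
    rw [hm]
    by_cases hmem : ((g : Nat) : Int) ∈ A
    · rw [if_pos hmem, if_pos ((PySem.Set.mem_ofList A _).2 hmem)]
      push_cast
      ring
    · rw [if_neg hmem, if_neg (fun h => hmem ((PySem.Set.mem_ofList A _).1 h))]
      push_cast
      ring

-- A's dp fold, started at position k ≥ 1 (so the i==1 correction is out of range), computes
-- acc·d^(remaining) plus, when the prefix is still tight, the rank of the remaining digits.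
theorem dpLoopRank (A : List Int) (B d : Int) (lower ds : List Int)
    (hlow1 : ∀ g : Int, 0 ≤ g → g ≤ 9 → PySem.List.pyGetD lower g 0 =
      (((PySem.Set.ofList A).countP (fun x => decide (x < g)) : Nat) : Int))
    (hlow2 : ∀ g : Int, 0 ≤ g → g ≤ 9 → PySem.List.pyGetD lower (g + 1) 0 =
      PySem.List.pyGetD lower g 0 + (if g ∈ A then 1 else 0))
    (n : Nat) (hB : B = (n : Int)) :
    ∀ (gs : List Int) (k : Nat) (dp : List Int) (flag : Bool) (acc : Int),
      1 ≤ k → (∀ g ∈ gs, 0 ≤ g ∧ g ≤ 9) → dp.length = n + 1 → k + gs.length = n →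
      ds.drop k = gs → dp.getD k 0 = acc →
      (((PySem.List.pyRange ((k : Int) + 1) (B + 1) 1).foldl
          (fun (s : List Int × Bool) i =>
            (PySem.List.pySetD s.1 i
              (if s.2 = true then
                PySem.List.pyGetD s.1 (i - 1) 0 * d +
                  (if i = 1 ∧ PySem.List.pyGetD A 0 0 = 0 ∧ B ≠ 1 then
                    PySem.List.pyGetD lower (PySem.List.pyGetD ds (i - 1) 0) 0 - 1
                  else PySem.List.pyGetD lower (PySem.List.pyGetD ds (i - 1) 0) 0)
              else PySem.List.pyGetD s.1 (i - 1) 0 * d),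
             s.2 && (PySem.List.pyGetD lower (PySem.List.pyGetD ds (i - 1) 0 + 1) 0 ==
               PySem.List.pyGetD lower (PySem.List.pyGetD ds (i - 1) 0) 0 + 1)))
          (dp, flag)).1.getD n 0)
      = acc * d ^ gs.length + (if flag then rankAlt (PySem.Set.ofList A) d gs else 0) := by
  intro gs
  induction gs with
  | nil =>
    intro k dp flag acc hk1 hgs hdp hk hdrop hacc
    have hkn : k = n := by simpa using hk
    subst hkn
    rw [hB, PySem.List.pyRange_one_eq_nil (by omega)]
    simp only [List.foldl_nil, rankAlt]
    rw [hacc]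
    cases flag <;> simp
  | cons g gs' ih =>
    intro k dp flag acc hk1 hgs hdp hk hdrop hacc
    have hkn : k < n := by simp at hk; omega
    have hgb := hgs g (by simp)
    rw [PySem.List.pyRange_one_cons (by rw [hB]; push_cast; omega)]
    simp only [List.foldl_cons]
    have hi1 : ((k : Int) + 1) - 1 = ((k : Nat) : Int) := by ring
    have hdsk : ds.getD k 0 = g := by
      rw [List.getD_eq_getElem?_getD]
      have h0 : ds[k]? = (ds.drop k)[0]? := by
        rw [List.getElem?_drop]
        norm_num
      rw [h0, hdrop]
      simp
    have hflag : (PySem.List.pyGetD lower (g + 1) 0 == PySem.List.pyGetD lower g 0 + 1) =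
        PySem.Set.contains (PySem.Set.ofList A) g := by
      rw [hlow2 g (by omega) (by omega)]
      by_cases hmem : g ∈ A
      · simp [hmem, PySem.Set.contains, PySem.Set.mem_ofList]
      · rw [if_neg hmem]
        have hfalse : ((PySem.List.pyGetD lower g 0 + 0 == PySem.List.pyGetD lower g 0 + 1)) = false := by
          rw [beq_eq_false_iff_ne]
          omega
        rw [hfalse]
        symm
        simp [PySem.Set.contains, PySem.Set.mem_ofList, hmem]
    have hne1 : (((k : Int) + 1 = 1) ∧ PySem.List.pyGetD A 0 0 = 0 ∧ B ≠ 1) = False := by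
      simp only [eq_iff_iff, iff_false]
      rintro ⟨h1, -⟩
      omega
    simp only [hi1, PySem.List.pyGetD_natCast, hdsk, hacc, hne1, if_false]
    rw [hflag, hlow1 g (by omega) (by omega)]
    have hcast2 : ((k : Int) + 1) = ((k + 1 : Nat) : Int) := by push_cast; ring
    rw [hcast2]
    simp only [PySem.List.pySetD_natCast]
    rw [ih (k + 1)
      (dp.set (k + 1)
        (if flag = true then
          acc * d + (((PySem.Set.ofList A).countP (fun x => decide (x < g)) : Nat) : Int)
        else acc * d))
      (flag && PySem.Set.contains (PySem.Set.ofList A) g)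
      (if flag = true then
          acc * d + (((PySem.Set.ofList A).countP (fun x => decide (x < g)) : Nat) : Int)
        else acc * d)
      (by omega) (fun g hg => hgs g (by simp [hg])) (by simp [hdp])
      (by simp at hk ⊢; omega)
      (by
        have := congrArg List.tail hdrop
        simpa [List.tail_drop] using this)
      (by
        rw [List.getD_eq_getElem?_getD, List.getElem?_set_self (by omega)]
        simp)]
    simp only [rankAlt, List.length_cons]
    cases flag with
    | false => simp [pow_succ]; ring
    | true =>
      by_cases hc : PySem.Set.contains (PySem.Set.ofList A) g
      · simp [hc, pow_succ]; ring
      · simp [hc, pow_succ]; ring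

theorem lower_char (A : List Int) (hA : ∀ x ∈ A, 0 ≤ x ∧ x ≤ 9) :
    ∀ gn : Nat, gn ≤ 10 →
      ((PySem.List.pyRange 1 11 1).foldl
        (fun L i => PySem.List.pySetD L i (PySem.List.pyGetD L (i - 1) 0 + PySem.List.pyGetD L i 0))
        ((PySem.List.pyRange 0 ((A.length : Int)) 1).foldl
          (fun L i => PySem.List.pySetD L (PySem.List.pyGetD A i 0 + 1) 1)
          (List.replicate 11 0))).getD gn 0
      = (((PySem.Set.ofList A).countP (fun x => decide (x < (gn : Int))) : Nat) : Int) := by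
  intro gn hgn
  have hfold : (PySem.List.pyRange 0 ((A.length : Int)) 1).foldl
      (fun L i => PySem.List.pySetD L (PySem.List.pyGetD A i 0 + 1) 1) (List.replicate 11 (0 : Int))
      = A.foldl (fun L x => PySem.List.pySetD L (x + 1) 1) (List.replicate 11 (0 : Int)) :=
    PySem.List.foldl_pyRange_zero_pyGetD' A 0 (fun L x => PySem.List.pySetD L (x + 1) 1) _
  rw [hfold]
  obtain ⟨hlen1, hval1⟩ := markFold A hA (List.replicate 11 0) (by simp)
  have h11 : (11 : Int) = ((11 : Nat) : Int) := by norm_num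
  rw [h11]
  obtain ⟨hlen2, hval2⟩ := prefixFold 11 (le_refl _) _ hlen1
  rw [hval2 gn hgn, if_pos (by omega)]
  rw [← cnt_eq A hA gn hgn]
  refine congrArg List.sum (List.map_congr_left ?_)
  intro j hj
  simp only [List.mem_range] at hj
  rw [hval1 j (by omega)]
  by_cases hm : ((j : Int) - 1) ∈ A
  · rw [if_pos hm, if_pos hm]
  · rw [if_neg hm, if_neg hm, List.getD_replicate]
    omega

set_option maxHeartbeats 2000000 in
theorem solve_eq (A : List Int) (B C : Int) (hC : 0 ≤ C) (hB0 : 0 ≤ B)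
    (hBz : B = 0 → PySem.List.pyGetD A 0 0 ≠ 0)
    (hDig : (10:Int) ^ (B - 1).toNat ≤ max C 1 ∧ max C 1 < 10 ^ B.toNat →
      ∀ x ∈ A, 0 ≤ x ∧ x ≤ 9) : solve A B C = solve_alt A B C := by
  simp only [solve, solve_alt]
  rw [numToVec_eq C hC]
  by_cases h1 : B > (((digitsAlt C).length : Nat) : Int) ∨ ((A.length : Nat) : Int) = 0
  · rw [if_pos h1,
      if_pos (show ((A.length : Int) = 0 ∨ B > ((digitsAlt C).length : Int)) by tauto)]
  · rw [if_neg h1,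
      if_neg (show ¬((A.length : Int) = 0 ∨ B > ((digitsAlt C).length : Int)) by tauto)]
    push_neg at h1
    by_cases h2 : B < (((digitsAlt C).length : Nat) : Int)
    · rw [if_pos h2, if_pos h2]
      by_cases hP : PySem.List.pyGetD A 0 0 = 0 ∧ B ≠ 1
      · have hBne : B ≠ 0 := fun h => hBz h hP.1
        have hBN : B.toNat = (B - 1).toNat + 1 := by omega
        rw [if_pos hP, if_pos hP, hBN, pow_succ]
        ring
      · rw [if_neg hP, if_neg hP]
    · rw [if_neg h2, if_neg h2]
      push_neg at h2
      have hn : B = (((digitsAlt C).length : Nat) : Int) := le_antisymm h1.1 h2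
      set n : Nat := (digitsAlt C).length with hnd
      have hnn : 0 < n := List.length_pos_of_ne_nil (digitsAlt_ne_nil C)
      have hA : ∀ x ∈ A, 0 ≤ x ∧ x ≤ 9 := hDig (by
        obtain ⟨hb1, hb2⟩ := digitsAlt_bounds C hC
        have e1 : (B - 1).toNat = n - 1 := by omega
        have e2 : B.toNat = n := by omega
        rw [e1, e2]
        exact ⟨hb1, hb2⟩)
      have hlow1 : ∀ g : Int, 0 ≤ g → g ≤ 10 →
          PySem.List.pyGetD
            ((PySem.List.pyRange 1 11 1).foldl
              (fun L i => PySem.List.pySetD L i (PySem.List.pyGetD L (i - 1) 0 + PySem.List.pyGetD L i 0))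
              ((PySem.List.pyRange 0 ((A.length : Int)) 1).foldl
                (fun L i => PySem.List.pySetD L (PySem.List.pyGetD A i 0 + 1) 1)
                (List.replicate 11 (0 : Int)))) g 0
          = (((PySem.Set.ofList A).countP (fun x => decide (x < g)) : Nat) : Int) := by
        intro g hg1 hg2
        have hg : g = ((g.toNat : Nat) : Int) := by omega
        rw [hg, PySem.List.pyGetD_natCast]
        exact lower_char A hA g.toNat (by omega)
      have hlow2 : ∀ g : Int, 0 ≤ g → g ≤ 9 →
          PySem.List.pyGetD
            ((PySem.List.pyRange 1 11 1).foldl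
              (fun L i => PySem.List.pySetD L i (PySem.List.pyGetD L (i - 1) 0 + PySem.List.pyGetD L i 0))
              ((PySem.List.pyRange 0 ((A.length : Int)) 1).foldl
                (fun L i => PySem.List.pySetD L (PySem.List.pyGetD A i 0 + 1) 1)
                (List.replicate 11 (0 : Int)))) (g + 1) 0
          = PySem.List.pyGetD
            ((PySem.List.pyRange 1 11 1).foldl
              (fun L i => PySem.List.pySetD L i (PySem.List.pyGetD L (i - 1) 0 + PySem.List.pyGetD L i 0))
              ((PySem.List.pyRange 0 ((A.length : Int)) 1).foldl
                (fun L i => PySem.List.pySetD L (PySem.List.pyGetD A i 0 + 1) 1)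
                (List.replicate 11 (0 : Int)))) g 0 + (if g ∈ A then 1 else 0) := by
        intro g hg1 hg2
        rw [hlow1 (g + 1) (by omega) (by omega), hlow1 g hg1 (by omega)]
        rw [countP_lt_split, countP_eq_ite _ _ (PySem.Set.nodup_ofList A)]
        by_cases hmem : g ∈ A
        · rw [if_pos ((PySem.Set.mem_ofList A g).2 hmem), if_pos hmem]
          push_cast; ring
        · rw [if_neg (fun h => hmem ((PySem.Set.mem_ofList A g).1 h)), if_neg hmem]
          push_cast; ring
      obtain ⟨g1, tl, hds⟩ : ∃ g1 tl, digitsAlt C = g1 :: tl := by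
        cases hh : digitsAlt C with
        | nil => exact absurd hh (digitsAlt_ne_nil C)
        | cons a l => exact ⟨a, l, rfl⟩
      have hg1 := digitsAlt_mem_range C hC g1 (by rw [hds]; simp)
      have hcnt := hlow1 g1 (by omega) (by omega)
      have hflag1 : (PySem.List.pyGetD
            ((PySem.List.pyRange 1 11 1).foldl
              (fun L i => PySem.List.pySetD L i (PySem.List.pyGetD L (i - 1) 0 + PySem.List.pyGetD L i 0))
              ((PySem.List.pyRange 0 ((A.length : Int)) 1).foldl
                (fun L i => PySem.List.pySetD L (PySem.List.pyGetD A i 0 + 1) 1)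
                (List.replicate 11 (0 : Int)))) (g1 + 1) 0 ==
          PySem.List.pyGetD
            ((PySem.List.pyRange 1 11 1).foldl
              (fun L i => PySem.List.pySetD L i (PySem.List.pyGetD L (i - 1) 0 + PySem.List.pyGetD L i 0))
              ((PySem.List.pyRange 0 ((A.length : Int)) 1).foldl
                (fun L i => PySem.List.pySetD L (PySem.List.pyGetD A i 0 + 1) 1)
                (List.replicate 11 (0 : Int)))) g1 0 + 1) =
          PySem.Set.contains (PySem.Set.ofList A) g1 := by
        rw [hlow2 g1 (by omega) (by omega)]
        by_cases hmem : g1 ∈ A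
        · simp [hmem, PySem.Set.contains, PySem.Set.mem_ofList]
        · rw [if_neg hmem]
          have hfalse : ((PySem.List.pyGetD
              ((PySem.List.pyRange 1 11 1).foldl
                (fun L i => PySem.List.pySetD L i (PySem.List.pyGetD L (i - 1) 0 + PySem.List.pyGetD L i 0))
                ((PySem.List.pyRange 0 ((A.length : Int)) 1).foldl
                  (fun L i => PySem.List.pySetD L (PySem.List.pyGetD A i 0 + 1) 1)
                  (List.replicate 11 (0 : Int)))) g1 0 + 0 ==
              PySem.List.pyGetD
              ((PySem.List.pyRange 1 11 1).foldl
                (fun L i => PySem.List.pySetD L i (PySem.List.pyGetD L (i - 1) 0 + PySem.List.pyGetD L i 0))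
                ((PySem.List.pyRange 0 ((A.length : Int)) 1).foldl
                  (fun L i => PySem.List.pySetD L (PySem.List.pyGetD A i 0 + 1) 1)
                  (List.replicate 11 (0 : Int)))) g1 0 + 1)) = false := by
            rw [beq_eq_false_iff_ne]
            omega
          rw [hfalse]
          symm
          simp [PySem.Set.contains, PySem.Set.mem_ofList, hmem]
      rw [hn]
      -- peel the first loop iteration (i = 1)
      rw [show ((n : Int) + 1) = ((n : Int) + 1) from rfl,
        PySem.List.pyRange_one_cons (by push_cast; omega : (1:Int) < (n : Int) + 1)]
      simp only [List.foldl_cons]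
      have hd0 : PySem.List.pyGetD (digitsAlt C) ((1:Int) - 1) 0 = g1 := by
        norm_num
        rw [show (0:Int) = ((0:Nat) : Int) from rfl, PySem.List.pyGetD_natCast, hds]
        simp
      have hdp0 : PySem.List.pyGetD (List.replicate (((n:Int) + 1)).toNat 0) ((1:Int) - 1) 0 = (0:Int) := by
        norm_num
        rw [show (0:Int) = ((0:Nat) : Int) from rfl, PySem.List.pyGetD_natCast]
        rw [List.getD_replicate]
        omega
      simp only [hd0, hdp0, hflag1]
      simp only [hcnt, true_and, if_true, Bool.true_and, zero_mul, zero_add]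
      rw [show ((1:Int) + 1) = (((1:Nat)):Int) + 1 by norm_num]
      rw [PySem.List.pyGetD_natCast]
      rw [dpLoopRank A ((n:Int)) ((A.length : Int)) _ (digitsAlt C)
        (fun g a b => hlow1 g a (by omega)) hlow2 n rfl tl 1
        (PySem.List.pySetD (List.replicate ((n:Int) + 1).toNat 0) 1
          (if PySem.List.pyGetD A 0 0 = 0 ∧ (n:Int) ≠ 1 then
            ((List.countP (fun x => decide (x < g1)) (PySem.Set.ofList A) : Nat) : Int) - 1
          else ((List.countP (fun x => decide (x < g1)) (PySem.Set.ofList A) : Nat) : Int)))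
        ((PySem.Set.ofList A).contains g1)
        (if PySem.List.pyGetD A 0 0 = 0 ∧ (n:Int) ≠ 1 then
            ((List.countP (fun x => decide (x < g1)) (PySem.Set.ofList A) : Nat) : Int) - 1
          else ((List.countP (fun x => decide (x < g1)) (PySem.Set.ofList A) : Nat) : Int))
        (le_refl 1)
        (fun g hg => digitsAlt_mem_range C hC g (by rw [hds]; simp [hg]))
        (by rw [PySem.List.length_pySetD, List.length_replicate]; omega)
        (by rw [hds] at hnd; simp at hnd; omega)
        (by rw [hds]; simp)
        (by
          rw [PySem.List.pySetD_of_nonneg _ _ (by norm_num)]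
          rw [show ((1:Int)).toNat = 1 from rfl]
          rw [List.getD_eq_getElem?_getD]
          rw [List.getElem?_set_self (by rw [List.length_replicate]; omega)]
          rfl)]
      rw [hds]
      simp only [rankAlt]
      have htl : ((n:Int) - 1).toNat = tl.length := by
        rw [hds] at hnd; simp at hnd; omega
      rw [htl]
      by_cases hP : PySem.List.pyGetD A 0 0 = 0 ∧ (n:Int) ≠ 1
      · rw [if_pos hP, if_pos hP]
        by_cases hc : PySem.Set.contains (PySem.Set.ofList A) g1
        · simp only [hc, if_true] <;> ring
        · simp only [hc, if_false, Bool.false_eq_true] <;> ring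
      · rw [if_neg hP]
        rw [if_neg hP]

-- ===== VERDICT (by name: the statement is the Claim_ definition above) =====
theorem solve_spec : Claim_equal_solve := by
  intro A B C hdom hpre
  unfold Pre_solve at hpre
  unfold Spec_solve
  exact solve_eq A B C hpre.1 hpre.2.1 hpre.2.2.1 hpre.2.2.2
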